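-- pv_equiv track=rewrite | github.com/Alberto-SC/Competitive-Programming-solutions | long contest/NAIPC/nwerc2017all/nwerc2017all/jugglingtroupe/problem_statement/coinfig.py | iterate
-- ===== SOURCE A (Python) =====
-- def iterate(c):
--   cc = [ 0 ] * len(c)
--   for i in range(len(c)):
--     if c[i] > 1:
--       cc[i] += c[i] - 2
--       if i - 1 >= 0: cc[i - 1] += 1
--       if i + 1 < len(c): cc[i + 1] += 1
--     else:
--       cc[i] += c[i]
--   return cc
-- ===== SOURCE B (Python) =====
-- def iterate(c):
--   n = len(c)
--   return [(c[i] - 2 if c[i] > 1 else c[i])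
--           + (1 if i - 1 >= 0 and c[i - 1] > 1 else 0)
--           + (1 if i + 1 < n and c[i + 1] > 1 else 0)
--           for i in range(n)]
-- ===== Notes on version B (the rewrite author's own statement) =====
-- stated objective: alternative
-- what changed: Scatter rewritten as gather: instead of each cell pushing +1 into its neighbors while a mutable output array accumulates, each output cell is computed in one place from its own value and its two neighbors, as a single list comprehension.
import Mathlib
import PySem

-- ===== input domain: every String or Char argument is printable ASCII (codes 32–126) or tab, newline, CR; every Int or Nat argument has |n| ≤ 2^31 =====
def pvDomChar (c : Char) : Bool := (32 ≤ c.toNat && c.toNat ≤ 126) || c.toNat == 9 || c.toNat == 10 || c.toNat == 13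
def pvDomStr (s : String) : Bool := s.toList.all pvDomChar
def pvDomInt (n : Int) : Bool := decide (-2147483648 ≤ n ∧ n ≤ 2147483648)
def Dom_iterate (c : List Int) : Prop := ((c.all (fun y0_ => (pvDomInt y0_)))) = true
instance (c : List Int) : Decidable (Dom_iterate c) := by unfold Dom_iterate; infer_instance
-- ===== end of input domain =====

-- B rewrites A's scatter (each cell pushing +1 to neighbors in a mutable array) as a
-- gather (each output cell computed in one place from itself and its two neighbors).

-- ===== PORT A =====
-- loop body of A: all indices accessed are in range, so getD is exact for Python's c[i]/cc[i]
def stepA (c : List Int) (cc : List Int) (i : Nat) : List Int :=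
  if c.getD i 0 > 1 then
    let cc1 := cc.set i (cc.getD i 0 + (c.getD i 0 - 2))
    let cc2 := if 1 ≤ i then cc1.set (i - 1) (cc1.getD (i - 1) 0 + 1) else cc1
    if i + 1 < c.length then cc2.set (i + 1) (cc2.getD (i + 1) 0 + 1) else cc2
  else cc.set i (cc.getD i 0 + c.getD i 0)

def iterate (c : List Int) : List Int :=
  (List.range c.length).foldl (stepA c) (List.replicate c.length 0)

-- ===== PORT B =====
def iterate_alt (c : List Int) : List Int :=
  (List.range c.length).map (fun i =>
    (if c.getD i 0 > 1 then c.getD i 0 - 2 else c.getD i 0)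
    + (if 1 ≤ i ∧ c.getD (i - 1) 0 > 1 then 1 else 0)
    + (if i + 1 < c.length ∧ c.getD (i + 1) 0 > 1 then 1 else 0))

-- ===== PRECONDITION & SPEC =====
def Spec_iterate (c : List Int) (out : List Int) : Prop := out = iterate_alt c
instance (c : List Int) (out : List Int) : Decidable (Spec_iterate c out) := by unfold Spec_iterate; infer_instance

-- ===== CLAIM (what is proved, stated in full; the proofs are below) =====
def Claim_equal_iterate : Prop := ∀ (c : List Int), Dom_iterate c → Spec_iterate c (iterate c)

-- ===== LEMMAS AND PROOFS =====

-- value cell j gets from its own pass of A's loop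
def baseVal (c : List Int) (j : Nat) : Int :=
  if c.getD j 0 > 1 then c.getD j 0 - 2 else c.getD j 0

lemma stepA_length (c cc : List Int) (i : Nat) :
    (stepA c cc i).length = cc.length := by
  unfold stepA; split_ifs <;> simp

lemma getD_set0 (l : List Int) (i j : Nat) (a : Int) (hi : i < l.length) :
    (l.set i a).getD j 0 = if i = j then a else l.getD j 0 := by
  simp only [List.getD_eq_getElem?_getD, List.getElem?_set]
  split_ifs <;> simp_all

lemma stepA_getD (c cc : List Int) (k j : Nat)
    (hlen : cc.length = c.length) (hk : k < c.length) (hj : j < c.length) :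
    (stepA c cc k).getD j 0 = cc.getD j 0
      + (if j = k then baseVal c j else 0)
      + (if c.getD k 0 > 1 ∧ 1 ≤ k ∧ j = k - 1 then 1 else 0)
      + (if c.getD k 0 > 1 ∧ k + 1 < c.length ∧ j = k + 1 then 1 else 0) := by
  have hk' : k < cc.length := by omega
  unfold stepA
  by_cases hc : c.getD k 0 > 1
  · rw [if_pos hc]
    set cc1 := cc.set k (cc.getD k 0 + (c.getD k 0 - 2)) with h1
    have l1 : cc1.length = cc.length := by rw [h1]; simp
    have g1 : ∀ m, cc1.getD m 0
        = if k = m then cc.getD k 0 + (c.getD k 0 - 2) else cc.getD m 0 :=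
      fun m => getD_set0 cc k m _ hk'
    set cc2 := if 1 ≤ k then cc1.set (k - 1) (cc1.getD (k - 1) 0 + 1) else cc1 with h2
    have l2 : cc2.length = cc.length := by rw [h2]; split_ifs <;> simp [l1]
    have g2 : ∀ m, cc2.getD m 0
        = cc1.getD m 0 + (if 1 ≤ k ∧ k - 1 = m then 1 else 0) := by
      intro m
      rw [h2]
      by_cases ha : 1 ≤ k
      · rw [if_pos ha, getD_set0 cc1 (k - 1) m _ (by omega)]
        by_cases hm : k - 1 = m
        · subst hm
          rw [if_pos rfl, if_pos ⟨ha, rfl⟩]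
        · rw [if_neg hm, if_neg (by tauto)]
          omega
      · rw [if_neg ha, if_neg (by tauto)]
        omega
    by_cases hb : k + 1 < c.length
    · rw [if_pos hb, getD_set0 cc2 (k + 1) j _ (by omega)]
      rw [g2 (k + 1), g2 j, g1 (k + 1), g1 j]
      unfold baseVal
      by_cases e1 : j = k + 1
      · subst e1; split_ifs <;> omega
      · by_cases e2 : j = k
        · subst e2; split_ifs <;> omega
        · split_ifs <;> omega
    · rw [if_neg hb, g2 j, g1 j]
      unfold baseVal
      by_cases e2 : j = k
      · subst e2; split_ifs <;> omega
      · split_ifs <;> omega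
  · rw [if_neg hc, getD_set0 cc k j _ hk']
    unfold baseVal
    by_cases e2 : j = k
    · subst e2; split_ifs <;> omega
    · split_ifs <;> omega

set_option maxHeartbeats 2000000 in
lemma foldl_inv (c : List Int) (k : Nat) (hk : k ≤ c.length) :
    ((List.range k).foldl (stepA c) (List.replicate c.length 0)).length = c.length ∧
    ∀ j, j < c.length →
      ((List.range k).foldl (stepA c) (List.replicate c.length 0)).getD j 0 =
        (if j < k then baseVal c j else 0)
        + (if 0 < j ∧ j - 1 < k ∧ c.getD (j - 1) 0 > 1 then 1 else 0)
        + (if j + 1 < k ∧ c.getD (j + 1) 0 > 1 then 1 else 0) := by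
  induction k with
  | zero =>
      constructor
      · simp
      · intro j hj
        simp [List.getD_eq_getElem?_getD, hj]
  | succ k ih =>
      obtain ⟨ihlen, ihval⟩ := ih (Nat.le_of_succ_le hk)
      have hk' : k < c.length := hk
      rw [List.range_succ, List.foldl_append]
      constructor
      · simp [stepA_length, ihlen]
      · intro j hj
        simp only [List.foldl_cons, List.foldl_nil]
        rw [stepA_getD c _ k j ihlen hk' hj, ihval j hj]
        by_cases h1 : j + 1 = k
        · have e1 : c.getD k 0 = c.getD (j + 1) 0 := by rw [← h1]
          rw [e1]; split_ifs <;> omega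
        · by_cases h2 : j = k + 1
          · have e2 : j - 1 = k := by omega
            rw [e2]; split_ifs <;> omega
          · split_ifs <;> omega

lemma iterate_alt_getD (c : List Int) (j : Nat) (hj : j < c.length) :
    (iterate_alt c).getD j 0 =
      baseVal c j
      + (if 0 < j ∧ c.getD (j - 1) 0 > 1 then 1 else 0)
      + (if j + 1 < c.length ∧ c.getD (j + 1) 0 > 1 then 1 else 0) := by
  unfold iterate_alt baseVal
  rw [List.getD_eq_getElem?_getD, List.getElem?_map]
  simp [hj]
  split_ifs <;> simp_all

-- ===== VERDICT (by name: the statement is the Claim_ definition above) =====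
theorem iterate_spec : Claim_equal_iterate := by
  intro c _
  unfold Spec_iterate
  obtain ⟨hlen, hval⟩ := foldl_inv c c.length le_rfl
  have hlen' : (iterate_alt c).length = c.length := by simp [iterate_alt]
  apply List.ext_getElem
  · unfold iterate; rw [hlen, hlen']
  · intro j h1 h2
    have hj : j < c.length := by rwa [hlen'] at h2
    have hA : (iterate c).getD j 0 = (iterate_alt c).getD j 0 := by
      unfold iterate
      rw [hval j hj, iterate_alt_getD c j hj]
      split_ifs <;> omega
    rw [List.getD_eq_getElem?_getD, List.getD_eq_getElem?_getD] at hA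
    simpa [List.getElem?_eq_getElem, h1, h2] using hA
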